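-- pv_equiv track=rewrite | github.com/Abhilash-du/daily-coding-challenges | DataStructures/Arrays_and_Maths/Advance_Arrays/MaxSubmatrixSum.py | solve
-- ===== SOURCE A (Python) =====
-- def solve(A):
--     r = len(A) + 1
--     c = len(A[0]) + 1
--
--     prefix_arr = [[0 for _ in range(c)] for __ in range(r)]
--
--     for rw in range(1, r):
--         for col in range(1, c):
--             prefix_arr[rw][col] = prefix_arr[rw][col - 1] + prefix_arr[rw - 1][col] + A[rw - 1][col - 1] - \
--                                   prefix_arr[rw - 1][col - 1]
--
--     max_sum = prefix_arr[r - 1][c - 1]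
--     fixed_end = prefix_arr[r - 1][c - 1]
--     for row in range(1, r):
--         for col in range(1, c):
--             if row == 1 and col == 1:
--                 continue
--             curr_sum = fixed_end - prefix_arr[r - 1][col - 1] - prefix_arr[row - 1][c - 1] + prefix_arr[row - 1][
--                 col - 1]
--             max_sum = max(curr_sum, max_sum)
--
--     return max_sum
-- ===== SOURCE B (Python) =====
-- def solve(A):
--     R = len(A)
--     C = len(A[0])
--     S = [[0] * (C + 1) for _ in range(R + 1)]
--     best = None
--     for i in range(R - 1, -1, -1):
--         for j in range(C - 1, -1, -1):
--             S[i][j] = A[i][j] + S[i + 1][j] + S[i][j + 1] - S[i + 1][j + 1]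
--             if best is None or S[i][j] > best:
--                 best = S[i][j]
--     return 0 if best is None else best
-- ===== Notes on version B (the rewrite author's own statement) =====
-- stated objective: simpler
-- what changed: Replaces the prefix-sum table plus a second inclusion-exclusion scan over all top-left corners by a single backward pass that fills a zero-padded suffix-sum table (each entry is directly a bottom-right-anchored submatrix sum) and tracks the running maximum inline.
import Mathlib
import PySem

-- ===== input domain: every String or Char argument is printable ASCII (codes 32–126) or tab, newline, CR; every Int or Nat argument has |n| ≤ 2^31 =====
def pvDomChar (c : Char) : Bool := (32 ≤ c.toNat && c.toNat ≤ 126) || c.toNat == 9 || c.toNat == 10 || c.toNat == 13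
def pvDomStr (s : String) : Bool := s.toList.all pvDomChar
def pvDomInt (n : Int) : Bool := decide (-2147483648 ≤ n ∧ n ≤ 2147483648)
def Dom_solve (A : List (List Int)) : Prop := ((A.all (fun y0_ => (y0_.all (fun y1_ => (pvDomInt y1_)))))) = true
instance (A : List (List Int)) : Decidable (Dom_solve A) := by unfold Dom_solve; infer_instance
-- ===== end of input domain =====

-- B replaces A's prefix-sum table + second inclusion-exclusion scan by one backward pass
-- filling a zero-padded suffix-sum table whose entries are the candidate sums, tracking the max inline.


-- ===== PORT A =====
-- 2D read t[i][j] / write t[i][j] = v (Python list-of-lists indexing; indices are in range under Pre_)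
def pget2 (t : List (List Int)) (i j : Int) : Int :=
  PySem.List.pyGetD (PySem.List.pyGetD t i []) j 0

def pset2 (t : List (List Int)) (i j : Int) (v : Int) : List (List Int) :=
  PySem.List.pySetD t i (PySem.List.pySetD (PySem.List.pyGetD t i []) j v)

def solve (A : List (List Int)) : Int :=
  let r : Int := PySem.List.len A + 1
  let c : Int := PySem.List.len (PySem.List.pyGetD A 0 []) + 1
  let prefixArr : List (List Int) :=
    (PySem.List.pyRange 0 r 1).map (fun _ => (PySem.List.pyRange 0 c 1).map (fun _ => (0 : Int)))
  let prefixArr : List (List Int) :=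
    (PySem.List.pyRange 1 r 1).foldl (fun t rw =>
      (PySem.List.pyRange 1 c 1).foldl (fun t col =>
        pset2 t rw col
          (pget2 t rw (col - 1) + pget2 t (rw - 1) col + pget2 A (rw - 1) (col - 1)
            - pget2 t (rw - 1) (col - 1))) t) prefixArr
  let maxSum : Int := pget2 prefixArr (r - 1) (c - 1)
  let fixedEnd : Int := pget2 prefixArr (r - 1) (c - 1)
  (PySem.List.pyRange 1 r 1).foldl (fun m row =>
    (PySem.List.pyRange 1 c 1).foldl (fun m col =>
      if row = 1 ∧ col = 1 then m
      else
        max (fixedEnd - pget2 prefixArr (r - 1) (col - 1) - pget2 prefixArr (row - 1) (c - 1)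
          + pget2 prefixArr (row - 1) (col - 1)) m) m) maxSum

-- ===== PORT B =====
-- best-so-far update: if best is None or v > best: best = v
def bstep (b : Option Int) (v : Int) : Option Int :=
  match b with
  | none => some v
  | some m => if v > m then some v else some m

def solve_alt (A : List (List Int)) : Int :=
  let R : Int := PySem.List.len A
  let C : Int := PySem.List.len (PySem.List.pyGetD A 0 [])
  let S0 : List (List Int) :=
    (PySem.List.pyRange 0 (R + 1) 1).map (fun _ => (PySem.List.pyRange 0 (C + 1) 1).map (fun _ => (0 : Int)))
  let res : List (List Int) × Option Int :=
    (PySem.List.pyRange (R - 1) (-1) (-1)).foldl (fun st i =>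
      (PySem.List.pyRange (C - 1) (-1) (-1)).foldl (fun (st : List (List Int) × Option Int) j =>
        let v : Int := pget2 A i j + pget2 st.1 (i + 1) j + pget2 st.1 i (j + 1) - pget2 st.1 (i + 1) (j + 1)
        (pset2 st.1 i j v, bstep st.2 v)) st) (S0, none)
  match res.2 with
  | none => 0
  | some m => m

-- ===== PRECONDITION & SPEC =====
-- Pre_ excludes exactly the inputs where Python A raises IndexError: an empty matrix (A[0]),
-- and matrices with a row shorter than the first row (A[rw-1][col-1]).
def Pre_solve (A : List (List Int)) : Prop :=
  A ≠ [] ∧ ∀ row ∈ A, (A.getD 0 []).length ≤ row.length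
instance (A : List (List Int)) : Decidable (Pre_solve A) := by unfold Pre_solve; infer_instance

def pvWitness_solve : List (List Int) := [[1, -2], [3, 4]]

def Spec_solve (A : List (List Int)) (out : Int) : Prop := out = solve_alt A
instance (A : List (List Int)) (out : Int) : Decidable (Spec_solve A out) := by unfold Spec_solve; infer_instance

-- ===== CLAIM (what is proved, stated in full; the proofs are below) =====
def Claim_equal_solve : Prop := ∀ (A : List (List Int)), Dom_solve A → Pre_solve A → Spec_solve A (solve A)

-- ===== LEMMAS AND PROOFS =====


-- entry A[x][y] as the ports read it (getD with default 0)
def aEnt (A : List (List Int)) (x y : Nat) : Int := (A.getD x []).getD y 0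

-- number of columns both programs use
def nC (A : List (List Int)) : Nat := (A.getD 0 []).length

-- prefix sums (A's table) and suffix sums (B's table)
def PfF (A : List (List Int)) (i j : Nat) : Int :=
  ∑ x ∈ Finset.range i, ∑ y ∈ Finset.range j, aEnt A x y

def SfF (A : List (List Int)) (i j : Nat) : Int :=
  ∑ x ∈ Finset.Ico i A.length, ∑ y ∈ Finset.Ico j (nC A), aEnt A x y

-- functional description of an (r × c) table
def mkT (r c : Nat) (f : Nat → Nat → Int) : List (List Int) :=
  (List.range r).map (fun i => (List.range c).map (fun j => f i j))

-- option-fold describing B's running best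
def ofold (b : Option Int) (l : List Int) : Option Int := l.foldl bstep b

-- pair enumerations (row-major for A, reverse order for B)
def PAl (Rn Cn : Nat) : List (Nat × Nat) :=
  (List.range Rn).flatMap (fun p => (List.range Cn).map (fun q => (p, q)))

def PBl (Rn Cn : Nat) : List (Nat × Nat) :=
  (List.range Rn).flatMap (fun k => (List.range Cn).map (fun t => (Rn - 1 - k, Cn - 1 - t)))

-- partial-table invariants
def phiA (A : List (List Int)) (k : Nat) : Nat → Nat → Int :=
  fun i j => if i ≤ k then PfF A i j else 0

def phiAin (A : List (List Int)) (k m : Nat) : Nat → Nat → Int :=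
  fun i j => if i ≤ k ∨ (i = k + 1 ∧ 1 ≤ j ∧ j ≤ m) then PfF A i j else 0

def psiO (A : List (List Int)) (k : Nat) : Nat → Nat → Int :=
  fun i j => if A.length - k ≤ i then SfF A i j else 0

def psiIn (A : List (List Int)) (p m : Nat) : Nat → Nat → Int :=
  fun i j => if p + 1 ≤ i ∨ (i = p ∧ nC A - m ≤ j) then SfF A i j else 0

-- table access lemmas
lemma pget2_mkT (r c : Nat) (f : Nat → Nat → Int) (i j : Nat) :
    pget2 (mkT r c f) (i : Int) (j : Int) = if i < r ∧ j < c then f i j else 0 := by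
  simp only [pget2, mkT, PySem.List.pyGetD_natCast]
  by_cases hi : i < r
  · rw [PySem.List.getD_map_range _ _ _ _ hi]
    by_cases hj : j < c
    · rw [PySem.List.getD_map_range _ _ _ _ hj]
      simp [hi, hj]
    · rw [List.getD_eq_default]
      · simp [hj]
      · simpa using hj
  · have houter : (List.map (fun i => List.map (fun j => f i j) (List.range c)) (List.range r)).getD i []
        = [] := List.getD_eq_default _ _ (by simpa using hi)
    rw [houter]
    simp [hi]

lemma pget2_A (A : List (List Int)) (x y : Nat) : pget2 A (x : Int) (y : Int) = aEnt A x y := by simp [pget2, aEnt]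

lemma pset2_mkT (r c : Nat) (f : Nat → Nat → Int) (i j : Nat) (v : Int)
    (hi : i < r) (hj : j < c) :
    pset2 (mkT r c f) (i : Int) (j : Int) v
      = mkT r c (fun i' j' => if i' = i ∧ j' = j then v else f i' j') := by
  simp only [pset2, mkT, PySem.List.pySetD_natCast, PySem.List.pyGetD_natCast]
  rw [PySem.List.getD_map_range _ _ _ _ hi]
  apply List.ext_getElem
  · simp
  · intro a h1 h2
    simp only [List.length_set, List.length_map, List.length_range] at h1
    rw [List.getElem_set]
    simp only [List.getElem_map, List.getElem_range]
    split_ifs with ha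
    · subst ha
      apply List.ext_getElem
      · simp
      · intro b g1 g2
        simp only [List.length_set, List.length_map, List.length_range] at g1
        rw [List.getElem_set]
        simp only [List.getElem_map, List.getElem_range]
        by_cases hbj : b = j
        · subst hbj; simp
        · rw [if_neg (fun h => hbj h.symm), if_neg (fun h => hbj h.2)]
    · apply List.map_congr_left
      intro b hb
      have : ¬(a = i ∧ b = j) := by
        intro hc; exact ha hc.1.symm
      simp [this]

lemma mkT_congr (r c : Nat) (f g : Nat → Nat → Int)
    (h : ∀ i < r, ∀ j < c, f i j = g i j) : mkT r c f = mkT r c g := by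
  simp only [mkT]
  apply List.map_congr_left
  intro i hi
  apply List.map_congr_left
  intro j hj
  exact h i (List.mem_range.mp hi) j (List.mem_range.mp hj)

-- sum identities
lemma PfF_zero_right (A : List (List Int)) (i : Nat) : PfF A i 0 = 0 := by simp [PfF]
lemma PfF_zero_left (A : List (List Int)) (j : Nat) : PfF A 0 j = 0 := by simp [PfF]

lemma PfF_rec (A : List (List Int)) (k m : Nat) :
    PfF A (k + 1) (m + 1) = PfF A (k + 1) m + PfF A k (m + 1) + aEnt A k m - PfF A k m := by
  simp only [PfF, Finset.sum_range_succ]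
  ring

lemma SfF_top (A : List (List Int)) (j : Nat) : SfF A A.length j = 0 := by simp [SfF]
lemma SfF_right (A : List (List Int)) (i : Nat) : SfF A i (nC A) = 0 := by simp [SfF]

lemma SfF_rec (A : List (List Int)) (p q : Nat) (hp : p < A.length) (hq : q < nC A) :
    SfF A p q = aEnt A p q + SfF A (p + 1) q + SfF A p (q + 1) - SfF A (p + 1) (q + 1) := by
  have h1 : SfF A p q = (∑ y ∈ Finset.Ico q (nC A), aEnt A p y) + SfF A (p + 1) q := by
    rw [SfF, Finset.sum_eq_sum_Ico_succ_bot hp]; rfl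
  have h2 : SfF A p (q + 1) = (∑ y ∈ Finset.Ico (q + 1) (nC A), aEnt A p y) + SfF A (p + 1) (q + 1) := by
    rw [SfF, Finset.sum_eq_sum_Ico_succ_bot hp]; rfl
  have h3 : (∑ y ∈ Finset.Ico q (nC A), aEnt A p y)
      = aEnt A p q + ∑ y ∈ Finset.Ico (q + 1) (nC A), aEnt A p y :=
    Finset.sum_eq_sum_Ico_succ_bot hq _
  rw [h1, h3, h2]; ring

lemma PfF_full (A : List (List Int)) : PfF A A.length (nC A) = SfF A 0 0 := by
  rw [PfF, SfF, Finset.range_eq_Ico]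

lemma E_eq_SfF (A : List (List Int)) (p q : Nat) (hp : p < A.length) (hq : q < nC A) :
    PfF A A.length (nC A) - PfF A A.length q - PfF A p (nC A) + PfF A p q = SfF A p q := by
  have hrow : ∀ x j, j ≤ nC A → (∑ y ∈ Finset.range (nC A), aEnt A x y)
      = (∑ y ∈ Finset.range j, aEnt A x y) + ∑ y ∈ Finset.Ico j (nC A), aEnt A x y := by
    intro x j hj
    rw [Finset.range_eq_Ico, ← Finset.sum_Ico_consecutive _ (Nat.zero_le j) hj]
  have hcol : ∀ j, j ≤ nC A → PfF A A.length j
      = PfF A p j + ∑ x ∈ Finset.Ico p A.length, ∑ y ∈ Finset.range j, aEnt A x y := by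
    intro j hj
    rw [PfF, PfF, Finset.range_eq_Ico, ← Finset.sum_Ico_consecutive _ (Nat.zero_le p) hp.le]
  rw [hcol (nC A) le_rfl, hcol q hq.le]
  have : (∑ x ∈ Finset.Ico p A.length, ∑ y ∈ Finset.range (nC A), aEnt A x y)
      - (∑ x ∈ Finset.Ico p A.length, ∑ y ∈ Finset.range q, aEnt A x y) = SfF A p q := by
    rw [← Finset.sum_sub_distrib, SfF]
    refine Finset.sum_congr rfl (fun x _ => ?_)
    rw [hrow x q hq.le]; ring
  linarith [this]

-- generic list lemmas
lemma rev_range (n : Nat) : (List.range n).reverse = (List.range n).map (fun k => n - 1 - k) := by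
  apply List.ext_getElem
  · simp
  · intro i h1 h2
    simp only [List.getElem_reverse, List.length_range, List.getElem_map, List.getElem_range]

lemma flipmax (s : Int) (l : List Int) :
    List.foldl (fun m v => max v m) s l = List.foldl max s l := by
  induction l generalizing s with
  | nil => rfl
  | cons x xs ih => simp only [List.foldl_cons, max_comm]

lemma foldl_max_mono (a b : Int) (l : List Int) :
    List.foldl max (max a b) l = max a (List.foldl max b l) := by
  induction l generalizing b with
  | nil => rfl
  | cons x xs ih => simp only [List.foldl_cons, max_assoc, ih]

lemma foldl_max_perm (x y : Int) (l m : List Int) (h : (x :: l).Perm (y :: m)) :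
    List.foldl max x l = List.foldl max y m := by
  have rc : RightCommutative (max : Int → Int → Int) := ⟨fun a b c => max_right_comm a b c⟩
  have h1 := @List.Perm.foldl_eq _ _ max _ _ rc h x
  have h2 := @List.Perm.foldl_eq _ _ max _ _ rc h.symm y
  simp only [List.foldl_cons, max_self] at h1 h2
  rw [foldl_max_mono] at h1 h2
  have e1 : List.foldl max x l ≤ List.foldl max y m := by
    rw [h2]; exact le_max_right _ _
  have e2 : List.foldl max y m ≤ List.foldl max x l := by
    rw [h1]; exact le_max_right _ _
  omega

lemma bstep_some (m v : Int) : bstep (some m) v = some (max m v) := by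
  simp only [bstep]
  split_ifs with h
  · rw [max_eq_right (le_of_lt h)]
  · rw [max_eq_left (by omega)]

lemma ofold_some (m : Int) (l : List Int) : ofold (some m) l = some (List.foldl max m l) := by
  induction l generalizing m with
  | nil => rfl
  | cons x xs ih => simp only [ofold, List.foldl_cons, bstep_some] at *; rw [ih]

lemma ofold_append (b : Option Int) (l1 l2 : List Int) : ofold b (l1 ++ l2) = ofold (ofold b l1) l2 := by simp [ofold, List.foldl_append]

-- A's table loop
lemma loopA_inner (A : List (List Int)) (k : Nat) (hk : k < A.length) (m : Nat) (hm : m ≤ nC A) :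
    (List.range m).foldl
      (fun t (q : Nat) =>
        pset2 t (1 + (k : Int)) (1 + (q : Int))
          (pget2 t (1 + (k : Int)) (1 + (q : Int) - 1) + pget2 t (1 + (k : Int) - 1) (1 + (q : Int)) +
              pget2 A (1 + (k : Int) - 1) (1 + (q : Int) - 1) -
            pget2 t (1 + (k : Int) - 1) (1 + (q : Int) - 1)))
      (mkT (A.length + 1) (nC A + 1) (phiAin A k 0))
    = mkT (A.length + 1) (nC A + 1) (phiAin A k m) := by
  revert hm
  induction m with
  | zero => intro _; rfl
  | succ m ih =>
    intro hm
    have hmC : m < nC A := by omega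
    rw [List.range_succ, List.foldl_append, ih (by omega)]
    simp only [List.foldl_cons, List.foldl_nil]
    have c1 : (1 + (k : Int)) = (((k + 1 : Nat)) : Int) := by omega
    have c2 : (1 + (m : Int)) = (((m + 1 : Nat)) : Int) := by omega
    have c3 : (1 + (k : Int) - 1) = ((k : Nat) : Int) := by omega
    have c4 : (1 + (m : Int) - 1) = ((m : Nat) : Int) := by omega
    rw [c3, c4, c1, c2, pget2_mkT, pget2_mkT, pget2_mkT, pget2_A]
    have r1 : (if k + 1 < A.length + 1 ∧ m < nC A + 1 then phiAin A k m (k + 1) m else 0)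
        = PfF A (k + 1) m := by
      rw [if_pos ⟨by omega, by omega⟩]
      unfold phiAin
      rcases Nat.eq_zero_or_pos m with h | h
      · rw [if_neg (by omega)]
        subst h
        rw [PfF_zero_right]
      · rw [if_pos (Or.inr ⟨rfl, h, le_rfl⟩)]
    have r2 : (if k < A.length + 1 ∧ m + 1 < nC A + 1 then phiAin A k m k (m + 1) else 0)
        = PfF A k (m + 1) := by
      rw [if_pos ⟨by omega, by omega⟩]
      unfold phiAin
      rw [if_pos (Or.inl le_rfl)]
    have r3 : (if k < A.length + 1 ∧ m < nC A + 1 then phiAin A k m k m else 0)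
        = PfF A k m := by
      rw [if_pos ⟨by omega, by omega⟩]
      unfold phiAin
      rw [if_pos (Or.inl le_rfl)]
    rw [r1, r2, r3,
      show PfF A (k + 1) m + PfF A k (m + 1) + aEnt A k m - PfF A k m = PfF A (k + 1) (m + 1) from
        (PfF_rec A k m).symm,
      pset2_mkT _ _ _ _ _ _ (by omega) (by omega)]
    apply mkT_congr
    intro i' hi' j' hj'
    by_cases hc : i' = k + 1 ∧ j' = m + 1
    · rw [if_pos hc]
      unfold phiAin
      rw [if_pos (Or.inr ⟨hc.1, by omega, by omega⟩), hc.1, hc.2]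
    · rw [if_neg hc]
      unfold phiAin
      split_ifs <;> first | rfl | omega

lemma loopA_outer (A : List (List Int)) (k : Nat) (hk : k ≤ A.length) :
    (List.range k).foldl
      (fun t (p : Nat) =>
        (List.range (nC A)).foldl
          (fun t (q : Nat) =>
            pset2 t (1 + (p : Int)) (1 + (q : Int))
              (pget2 t (1 + (p : Int)) (1 + (q : Int) - 1) + pget2 t (1 + (p : Int) - 1) (1 + (q : Int)) +
                  pget2 A (1 + (p : Int) - 1) (1 + (q : Int) - 1) -
                pget2 t (1 + (p : Int) - 1) (1 + (q : Int) - 1))) t)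
      (mkT (A.length + 1) (nC A + 1) (fun _ _ => 0))
    = mkT (A.length + 1) (nC A + 1) (phiA A k) := by
  revert hk
  induction k with
  | zero =>
    intro _
    apply mkT_congr
    intro i hi j hj
    unfold phiA
    split_ifs with h
    · have h0 : i = 0 := by omega
      subst h0
      rw [PfF_zero_left]
    · rfl
  | succ k ih =>
    intro hk
    rw [List.range_succ, List.foldl_append, ih (by omega)]
    simp only [List.foldl_cons, List.foldl_nil]
    have hstart : mkT (A.length + 1) (nC A + 1) (phiA A k)
        = mkT (A.length + 1) (nC A + 1) (phiAin A k 0) := by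
      apply mkT_congr
      intro i hi j hj
      unfold phiA phiAin
      split_ifs <;> first | rfl | omega
    rw [hstart, loopA_inner A k (by omega) (nC A) le_rfl]
    apply mkT_congr
    intro i hi j hj
    unfold phiAin phiA
    split_ifs with h1 h2
    · rfl
    · omega
    · have hj0 : j = 0 := by omega
      subst hj0
      rw [PfF_zero_right]
    · rfl


lemma mem_PAl (Rn Cn : Nat) (pq : Nat × Nat) (h : pq ∈ PAl Rn Cn) : pq.1 < Rn ∧ pq.2 < Cn := by
  simp only [PAl, List.mem_flatMap, List.mem_map, List.mem_range] at h
  obtain ⟨p, hp, q, hq, hEq⟩ := h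
  subst hEq
  exact ⟨hp, hq⟩

lemma maxA_nested (g : Nat → Nat → Int) (Rn Cn : Nat) (s : Int) :
    (List.range Rn).foldl
      (fun m (p : Nat) => (List.range Cn).foldl
        (fun m (q : Nat) => if 1 + (p : Int) = 1 ∧ 1 + (q : Int) = 1 then m else max (g p q) m) m) s
    = (PAl Rn Cn).foldl
        (fun m pq => if pq.1 = 0 ∧ pq.2 = 0 then m else max (g pq.1 pq.2) m) s := by
  have hiff : ∀ p q : Nat, (1 + (p : Int) = 1 ∧ 1 + (q : Int) = 1) ↔ (p = 0 ∧ q = 0) := by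
    intro p q; constructor <;> intro h <;> exact ⟨by omega, by omega⟩
  induction Rn generalizing s with
  | zero => rfl
  | succ Rn ih =>
    rw [PAl, List.range_succ, List.foldl_append, List.flatMap_append, List.foldl_append, ← PAl, ih]
    simp only [List.flatMap_cons, List.flatMap_nil, List.append_nil, List.foldl_cons, List.foldl_nil,
      List.foldl_map]
    apply PySem.List.foldl_congr_mem
    intro acc q _
    simp only [hiff]

-- characterization of A's result
lemma solveA_char (A : List (List Int)) :
    solve A = (PAl A.length (nC A)).foldl
      (fun m pq => if pq.1 = 0 ∧ pq.2 = 0 then m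
        else max (PfF A A.length (nC A) - PfF A A.length pq.2 - PfF A pq.1 (nC A) + PfF A pq.1 pq.2) m)
      (PfF A A.length (nC A)) := by
  have hnC : (A.getD 0 []).length = nC A := rfl
  have hA0 : PySem.List.pyGetD A 0 ([] : List Int) = A.getD 0 [] := PySem.List.pyGetD_zero _ _
  unfold solve
  simp only [hA0, PySem.List.len_eq, hnC]
  have hr1 : PySem.List.pyRange 1 ((A.length : Int) + 1) 1
      = (List.range A.length).map (fun k : Nat => 1 + (k : Int)) := by
    rw [PySem.List.pyRange_one]
    congr 2
    omega
  have hc1 : PySem.List.pyRange 1 ((nC A : Int) + 1) 1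
      = (List.range (nC A)).map (fun k : Nat => 1 + (k : Int)) := by
    rw [PySem.List.pyRange_one]
    congr 2
    omega
  have hr0 : PySem.List.pyRange 0 ((A.length : Int) + 1) 1
      = List.map (fun k : Nat => (k : Int)) (List.range (A.length + 1)) := by
    rw [show ((A.length : Int) + 1) = ((A.length + 1 : Nat) : Int) by omega, PySem.List.pyRange_zero_nat]
  have hc0 : PySem.List.pyRange 0 ((nC A : Int) + 1) 1
      = List.map (fun k : Nat => (k : Int)) (List.range (nC A + 1)) := by
    rw [show ((nC A : Int) + 1) = ((nC A + 1 : Nat) : Int) by omega, PySem.List.pyRange_zero_nat]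
  have hinit : (PySem.List.pyRange 0 ((A.length : Int) + 1) 1).map
      (fun _ => (PySem.List.pyRange 0 ((nC A : Int) + 1) 1).map (fun _ => (0 : Int)))
      = mkT (A.length + 1) (nC A + 1) (fun _ _ => 0) := by
    rw [hr0, hc0, List.map_map, List.map_map]
    rfl
  rw [hinit]
  simp only [hr1, hc1, List.foldl_map]
  rw [loopA_outer A A.length le_rfl]
  have e1 : ((A.length : Int) + 1 - 1) = ((A.length : Nat) : Int) := by omega
  have e2 : ((nC A : Int) + 1 - 1) = ((nC A : Nat) : Int) := by omega
  have e3 : ∀ q : Nat, (1 + (q : Int) - 1) = ((q : Nat) : Int) := by intro q; omega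
  simp only [e1, e2, e3]
  have hfix : pget2 (mkT (A.length + 1) (nC A + 1) (phiA A A.length)) ((A.length : Nat) : Int)
      ((nC A : Nat) : Int) = PfF A A.length (nC A) := by
    rw [pget2_mkT, if_pos ⟨by omega, by omega⟩]
    unfold phiA
    rw [if_pos le_rfl]
  simp only [hfix]
  rw [maxA_nested]
  apply PySem.List.foldl_congr_mem
  intro acc pq hpq
  obtain ⟨hp, hq⟩ := mem_PAl _ _ _ hpq
  by_cases h0 : pq.1 = 0 ∧ pq.2 = 0
  · rw [if_pos h0, if_pos h0]
  · rw [if_neg h0, if_neg h0]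
    congr 1
    rw [pget2_mkT, pget2_mkT, pget2_mkT,
      if_pos ⟨by omega, by omega⟩, if_pos ⟨by omega, by omega⟩, if_pos ⟨by omega, by omega⟩]
    unfold phiA
    rw [if_pos le_rfl, if_pos (by omega), if_pos (by omega)]

-- B's combined loop
lemma loopB_inner (A : List (List Int)) (p : Nat) (hp : p < A.length) (b0 : Option Int) (m : Nat) (hm : m ≤ nC A) :
    (List.range m).foldl
      (fun (st : List (List Int) × Option Int) (t : Nat) =>
        let v : Int := pget2 A (p : Int) ((nC A : Int) - 1 - (t : Int)) +
            pget2 st.1 ((p : Int) + 1) ((nC A : Int) - 1 - (t : Int)) +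
            pget2 st.1 (p : Int) ((nC A : Int) - 1 - (t : Int) + 1) -
            pget2 st.1 ((p : Int) + 1) ((nC A : Int) - 1 - (t : Int) + 1)
        (pset2 st.1 (p : Int) ((nC A : Int) - 1 - (t : Int)) v, bstep st.2 v))
      (mkT (A.length + 1) (nC A + 1) (psiIn A p 0), b0)
    = (mkT (A.length + 1) (nC A + 1) (psiIn A p m),
       ofold b0 ((List.range m).map (fun t => SfF A p (nC A - 1 - t)))) := by
  revert hm
  induction m with
  | zero => intro _; rfl
  | succ m ih =>
    intro hm
    have hmC : m < nC A := by omega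
    rw [List.range_succ, List.foldl_append, ih (by omega), List.map_append, ofold_append]
    simp only [List.foldl_cons, List.foldl_nil, List.map_cons, List.map_nil]
    have d1 : ((nC A : Int) - 1 - (m : Int)) = ((nC A - 1 - m : Nat) : Int) := by omega
    have d2 : ((p : Int) + 1) = ((p + 1 : Nat) : Int) := by omega
    have d3 : ((nC A : Int) - 1 - (m : Int) + 1) = ((nC A - m : Nat) : Int) := by omega
    rw [d3, d1, d2, pget2_mkT, pget2_mkT, pget2_mkT, pget2_A]
    have r1 : (if p + 1 < A.length + 1 ∧ nC A - 1 - m < nC A + 1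
        then psiIn A p m (p + 1) (nC A - 1 - m) else 0) = SfF A (p + 1) (nC A - 1 - m) := by
      rw [if_pos ⟨by omega, by omega⟩]
      unfold psiIn
      rw [if_pos (Or.inl le_rfl)]
    have r2 : (if p < A.length + 1 ∧ nC A - m < nC A + 1
        then psiIn A p m p (nC A - m) else 0) = SfF A p (nC A - m) := by
      rw [if_pos ⟨by omega, by omega⟩]
      unfold psiIn
      rw [if_pos (Or.inr ⟨rfl, le_rfl⟩)]
    have r3 : (if p + 1 < A.length + 1 ∧ nC A - m < nC A + 1
        then psiIn A p m (p + 1) (nC A - m) else 0) = SfF A (p + 1) (nC A - m) := by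
      rw [if_pos ⟨by omega, by omega⟩]
      unfold psiIn
      rw [if_pos (Or.inl le_rfl)]
    rw [r1, r2, r3]
    have hq1 : nC A - 1 - m + 1 = nC A - m := by omega
    have vrec : aEnt A p (nC A - 1 - m) + SfF A (p + 1) (nC A - 1 - m) + SfF A p (nC A - m)
        - SfF A (p + 1) (nC A - m)
        = SfF A p (nC A - 1 - m) := by
      rw [← hq1, ← SfF_rec A p (nC A - 1 - m) hp (by omega)]
    rw [vrec, pset2_mkT _ _ _ _ _ _ (by omega) (by omega), Prod.mk.injEq]
    constructor
    · apply mkT_congr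
      intro i' hi' j' hj'
      by_cases hc : i' = p ∧ j' = nC A - 1 - m
      · rw [if_pos hc]
        unfold psiIn
        rw [if_pos (Or.inr ⟨hc.1, by omega⟩), hc.1, hc.2]
      · rw [if_neg hc]
        unfold psiIn
        split_ifs <;> first | rfl | omega
    · rfl

lemma loopB_outer (A : List (List Int)) (k : Nat) (hk : k ≤ A.length) :
    (List.range k).foldl
      (fun (st : List (List Int) × Option Int) (kk : Nat) =>
        (List.range (nC A)).foldl
          (fun (st : List (List Int) × Option Int) (t : Nat) =>
            let v : Int := pget2 A ((A.length : Int) - 1 - (kk : Int)) ((nC A : Int) - 1 - (t : Int)) +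
                pget2 st.1 ((A.length : Int) - 1 - (kk : Int) + 1) ((nC A : Int) - 1 - (t : Int)) +
                pget2 st.1 ((A.length : Int) - 1 - (kk : Int)) ((nC A : Int) - 1 - (t : Int) + 1) -
                pget2 st.1 ((A.length : Int) - 1 - (kk : Int) + 1) ((nC A : Int) - 1 - (t : Int) + 1)
            (pset2 st.1 ((A.length : Int) - 1 - (kk : Int)) ((nC A : Int) - 1 - (t : Int)) v, bstep st.2 v)) st)
      (mkT (A.length + 1) (nC A + 1) (fun _ _ => 0), none)
    = (mkT (A.length + 1) (nC A + 1) (psiO A k),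
       ofold none ((List.range k).flatMap
         (fun kk => (List.range (nC A)).map (fun t => SfF A (A.length - 1 - kk) (nC A - 1 - t))))) := by
  revert hk
  induction k with
  | zero =>
    intro _
    rw [Prod.mk.injEq]
    constructor
    · apply mkT_congr
      intro i hi j hj
      unfold psiO
      split_ifs with h
      · have hiR : i = A.length := by omega
        subst hiR
        rw [SfF_top]
      · rfl
    · rfl
  | succ k ih =>
    intro hk
    rw [List.range_succ, List.foldl_append, ih (by omega)]
    simp only [List.foldl_cons, List.foldl_nil]
    have e : ((A.length : Int) - 1 - (k : Int)) = ((A.length - 1 - k : Nat) : Int) := by omega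
    rw [e]
    have hstart : mkT (A.length + 1) (nC A + 1) (psiO A k)
        = mkT (A.length + 1) (nC A + 1) (psiIn A (A.length - 1 - k) 0) := by
      apply mkT_congr
      intro i hi j hj
      unfold psiO psiIn
      split_ifs with h1 h2
      · rfl
      · omega
      · have hj0 : j = nC A := by omega
        subst hj0
        rw [SfF_right]
      · rfl
    rw [hstart, loopB_inner A (A.length - 1 - k) (by omega) _ (nC A) le_rfl, Prod.mk.injEq]
    constructor
    · apply mkT_congr
      intro i hi j hj
      unfold psiIn psiO
      split_ifs <;> first | rfl | omega
    · simp only [List.flatMap_append, ofold_append, List.flatMap_cons,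
        List.flatMap_nil, List.append_nil]

-- characterization of B's result
lemma solveB_char (A : List (List Int)) :
    solve_alt A = (match ofold none ((PBl A.length (nC A)).map (fun pq => SfF A pq.1 pq.2)) with
      | none => 0
      | some m => m) := by
  have hnC : (A.getD 0 []).length = nC A := rfl
  have hA0 : PySem.List.pyGetD A 0 ([] : List Int) = A.getD 0 [] := PySem.List.pyGetD_zero _ _
  unfold solve_alt
  simp only [hA0, PySem.List.len_eq, hnC]
  have hrB : PySem.List.pyRange ((A.length : Int) - 1) (-1) (-1)
      = (List.range A.length).map (fun k : Nat => (A.length : Int) - 1 - (k : Int)) := by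
    rw [PySem.List.pyRange_neg_one]
    congr 2
    omega
  have hcB : PySem.List.pyRange ((nC A : Int) - 1) (-1) (-1)
      = (List.range (nC A)).map (fun k : Nat => (nC A : Int) - 1 - (k : Int)) := by
    rw [PySem.List.pyRange_neg_one]
    congr 2
    omega
  have hr0 : PySem.List.pyRange 0 ((A.length : Int) + 1) 1
      = List.map (fun k : Nat => (k : Int)) (List.range (A.length + 1)) := by
    rw [show ((A.length : Int) + 1) = ((A.length + 1 : Nat) : Int) by omega, PySem.List.pyRange_zero_nat]
  have hc0 : PySem.List.pyRange 0 ((nC A : Int) + 1) 1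
      = List.map (fun k : Nat => (k : Int)) (List.range (nC A + 1)) := by
    rw [show ((nC A : Int) + 1) = ((nC A + 1 : Nat) : Int) by omega, PySem.List.pyRange_zero_nat]
  have hinit : (PySem.List.pyRange 0 ((A.length : Int) + 1) 1).map
      (fun _ => (PySem.List.pyRange 0 ((nC A : Int) + 1) 1).map (fun _ => (0 : Int)))
      = mkT (A.length + 1) (nC A + 1) (fun _ _ => 0) := by
    rw [hr0, hc0, List.map_map, List.map_map]
    rfl
  rw [hinit]
  simp only [hrB, hcB, List.foldl_map]
  rw [loopB_outer A A.length le_rfl]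
  have hL : (PBl A.length (nC A)).map (fun pq => SfF A pq.1 pq.2)
      = (List.range A.length).flatMap
        (fun kk => (List.range (nC A)).map (fun t => SfF A (A.length - 1 - kk) (nC A - 1 - t))) := by
    rw [PBl, List.map_flatMap]
    congr 1
    funext kk
    rw [List.map_map]
    rfl
  rw [← hL]

lemma PBl_eq_reverse (Rn Cn : Nat) : PBl Rn Cn = (PAl Rn Cn).reverse := by
  rw [PAl, PBl, List.reverse_flatMap, rev_range, List.flatMap_map]
  congr 1
  funext k
  simp only [Function.comp_apply]
  rw [← List.map_reverse, rev_range, List.map_map]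
  rfl

lemma match_ofold (y : Int) (l : List Int) :
    (match ofold none (y :: l) with
      | none => 0
      | some m => m) = List.foldl max y l := by
  rw [show ofold none (y :: l) = ofold (some y) l from rfl, ofold_some]

-- ===== VERDICT (by name: the statement is the Claim_ definition above) =====
theorem solve_spec : Claim_equal_solve := by
  intro A _ hPre
  unfold Spec_solve
  obtain ⟨hne, -⟩ := hPre
  have hR : 0 < A.length := by
    cases A with
    | nil => exact absurd rfl hne
    | cons a as => simp
  rw [solveA_char, solveB_char]
  by_cases hC0 : nC A = 0
  · rw [hC0]
    have h1 : PAl A.length 0 = [] := by simp [PAl]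
    have h2 : PBl A.length 0 = [] := by simp [PBl]
    rw [h1, h2, PfF_zero_right]
    rfl
  · obtain ⟨R', hR'⟩ : ∃ R', A.length = R' + 1 := ⟨A.length - 1, by omega⟩
    obtain ⟨C', hC'⟩ : ∃ C', nC A = C' + 1 := ⟨nC A - 1, by omega⟩
    rw [hR', hC']
    have hPA : PAl (R' + 1) (C' + 1)
        = ((0, 0) : Nat × Nat) :: (((List.range C').map (fun q => ((0 : Nat), q + 1)))
          ++ (List.map Nat.succ (List.range R')).flatMap
              (fun p => (List.range (C' + 1)).map (fun q => (p, q)))) := by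
      rw [PAl,
        show List.range (R' + 1) = 0 :: List.map Nat.succ (List.range R') from List.range_succ_eq_map,
        List.flatMap_cons,
        show List.map (fun q => ((0 : Nat), q)) (List.range (C' + 1))
            = ((0, 0) : Nat × Nat) :: List.map (fun q => ((0 : Nat), q + 1)) (List.range C') from by
          rw [List.range_succ_eq_map, List.map_cons, List.map_map]
          rfl,
        List.cons_append]
    set Tl : List (Nat × Nat) := ((List.range C').map (fun q => ((0 : Nat), q + 1)))
      ++ (List.map Nat.succ (List.range R')).flatMap
          (fun p => (List.range (C' + 1)).map (fun q => (p, q))) with hTdef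
    have hmemT : ∀ pq ∈ Tl, pq.1 < R' + 1 ∧ pq.2 < C' + 1 := by
      intro pq h
      have hmem : pq ∈ PAl (R' + 1) (C' + 1) := by
        rw [hPA]
        exact List.mem_cons_of_mem _ h
      exact mem_PAl _ _ _ hmem
    have hT0 : ∀ pq ∈ Tl, ¬(pq.1 = 0 ∧ pq.2 = 0) := by
      intro pq h
      rw [hTdef] at h
      rcases List.mem_append.mp h with h | h
      · obtain ⟨q, _, rfl⟩ := List.mem_map.mp h
        simp
      · obtain ⟨p, hp, hmem⟩ := List.mem_flatMap.mp h
        obtain ⟨q, _, rfl⟩ := List.mem_map.mp hmem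
        obtain ⟨p', _, rfl⟩ := List.mem_map.mp hp
        simp
    rw [hPA]
    simp only [List.foldl_cons]
    rw [if_pos (⟨trivial, trivial⟩ : True ∧ True)]
    have hcong : List.foldl
        (fun m pq => if pq.1 = 0 ∧ pq.2 = 0 then m
          else max (PfF A (R' + 1) (C' + 1) - PfF A (R' + 1) pq.2 - PfF A pq.1 (C' + 1)
            + PfF A pq.1 pq.2) m)
        (PfF A (R' + 1) (C' + 1)) Tl
        = List.foldl (fun m pq => max (SfF A pq.1 pq.2) m) (PfF A (R' + 1) (C' + 1)) Tl := by
      apply PySem.List.foldl_congr_mem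
      intro acc pq hpq
      rw [if_neg (hT0 pq hpq)]
      obtain ⟨h1, h2⟩ := hmemT pq hpq
      congr 1
      rw [← hR', ← hC']
      exact E_eq_SfF A pq.1 pq.2 (by omega) (by omega)
    rw [hcong]
    have hmapA : List.foldl (fun m pq => max (SfF A pq.1 pq.2) m) (PfF A (R' + 1) (C' + 1)) Tl
        = List.foldl max (PfF A (R' + 1) (C' + 1)) (Tl.map (fun pq => SfF A pq.1 pq.2)) := by
      rw [← flipmax, List.foldl_map]
    rw [hmapA, PBl_eq_reverse, hPA, List.reverse_cons]
    have hBlist : List.map (fun pq => SfF A pq.1 pq.2) (Tl.reverse ++ [((0 : Nat), (0 : Nat))])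
        = (SfF A 0 0 :: Tl.map (fun pq => SfF A pq.1 pq.2)).reverse := by
      rw [List.reverse_cons, List.map_append, List.map_reverse]
      rfl
    rw [hBlist]
    obtain ⟨y, m', hy⟩ : ∃ y m',
        (SfF A 0 0 :: Tl.map (fun pq => SfF A pq.1 pq.2)).reverse = y :: m' := by
      cases h : (SfF A 0 0 :: Tl.map (fun pq => SfF A pq.1 pq.2)).reverse with
      | nil =>
        exfalso
        have hlen := congrArg List.length h
        simp at hlen
      | cons a b => exact ⟨a, b, rfl⟩
    rw [hy, match_ofold]
    have hPfull : PfF A (R' + 1) (C' + 1) = SfF A 0 0 := by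
      rw [← hR', ← hC']
      exact PfF_full A
    rw [hPfull]
    apply foldl_max_perm
    rw [← hy]
    exact (List.reverse_perm _).symm
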